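-- pv_equiv track=rewrite | github.com/seagpt/PhotoPackager | bootstrap.py | _clean_pkg_name
-- ===== SOURCE A (Python) =====
-- from typing import List, Tuple, Optional
--
-- def _clean_pkg_name(pkg_spec: str) -> Optional[str]:
--     """
--     Cleans a package specification line by removing version specifiers,
--     markers, and comments. Returns the base package name.
--     """
--     line = pkg_spec.strip()
--     if not line or line.startswith('#'):
--         return None
--     # Remove inline comments and markers
--     line = line.split('#')[0].split(';')[0]
--     # Remove version specifiers (==, >=, <=, ~=, >, <)
--     for spec in ['==', '>=', '<=', '~=', '>', '<']:
--         if spec in line: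
--             line = line.split(spec)[0]
--     # Remove extras (e.g. package[extra])
--     if '[' in line:
--         line = line.split('[')[0]
--     return line.strip() or None
-- ===== SOURCE B (Python) =====
-- from typing import Optional
--
--
-- def _clean_pkg_name(pkg_spec: str) -> Optional[str]:
--     """
--     Single left-to-right scan: copy characters until the first delimiter
--     ('#', ';', '<', '>', '[', '==' or '~=') and return the stripped prefix.
--     """
--     s = pkg_spec.strip()
--     n = len(s)
--     i = 0
--     while i < n:
--         c = s[i]
--         if c in '#;<>[':
--             break
--         if (c == '=' or c == '~') and i + 1 < n and s[i + 1] == '=':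
--             break
--         i += 1
--     name = s[:i].strip()
--     return name if name else None
-- ===== Notes on version B (the rewrite author's own statement) =====
-- stated objective: simpler
-- what changed: B replaces A's chain of split('#')/split(';'), the loop over six version-specifier splits and the extras split by one left-to-right scan that stops at the first delimiter ('#', ';', '<', '>', '[', '==' or '~='), so the empty/comment guards fall out of the scan.
-- outside the precondition, e.g. on _clean_pkg_name('a~==b'): A returns 'a~', B returns 'a'
import Mathlib
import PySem

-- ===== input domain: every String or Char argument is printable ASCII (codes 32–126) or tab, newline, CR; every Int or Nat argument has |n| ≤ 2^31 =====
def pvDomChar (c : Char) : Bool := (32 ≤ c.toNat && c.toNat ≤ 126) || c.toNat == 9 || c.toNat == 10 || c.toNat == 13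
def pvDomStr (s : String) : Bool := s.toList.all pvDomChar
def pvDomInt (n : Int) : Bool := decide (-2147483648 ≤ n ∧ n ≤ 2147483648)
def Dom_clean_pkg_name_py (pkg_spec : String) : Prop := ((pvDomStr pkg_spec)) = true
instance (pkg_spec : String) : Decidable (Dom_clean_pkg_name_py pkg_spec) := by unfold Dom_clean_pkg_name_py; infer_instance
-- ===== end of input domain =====

-- B replaces A's several split passes by one left-to-right scan stopping at the first
-- delimiter; objective: simpler (one pass, the empty/'#' guards fall out of the scan).

-- ===== PORT A =====
def clean_pkg_name_py (pkg_spec : String) : Option String :=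
  let line := PySem.Str.strip pkg_spec
  if line == "" || PySem.Str.startswith line "#" then none
  else
    -- split(sep)[0]: split with a non-empty separator is never empty, so headD "" is exact
    let line1 := ((PySem.Str.split? line "#").getD []).headD ""
    let line2 := ((PySem.Str.split? line1 ";").getD []).headD ""
    let line3 := ["==", ">=", "<=", "~=", ">", "<"].foldl
      (fun l spec =>
        if PySem.Str.isIn spec l then ((PySem.Str.split? l spec).getD []).headD "" else l) line2
    let line4 := if PySem.Str.isIn "[" line3
      then ((PySem.Str.split? line3 "[").getD []).headD "" else line3
    let res := PySem.Str.strip line4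
    if res == "" then none else some res

-- ===== PORT B =====
-- the while-loop of Source B: copy characters until the first delimiter
def bScanChars : List Char → List Char
  | [] => []
  | c :: rest =>
    if c = '#' ∨ c = ';' ∨ c = '<' ∨ c = '>' ∨ c = '[' then []
    else if (c = '=' ∨ c = '~') ∧ rest.head? = some '=' then []
    else c :: bScanChars rest

def clean_pkg_name_py_alt (pkg_spec : String) : Option String :=
  let s := PySem.Str.strip pkg_spec
  let name := PySem.Str.strip (String.ofList (bScanChars s.toList))
  if name == "" then none else some name

-- ===== PRECONDITION & SPEC =====
-- Pre_ excludes lines whose stripped form contains the substring "~==": there A's fixed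
-- split order ('==' before '~=') picks its cut point accidentally ('a~==b' → 'a~'), while
-- B's earliest-delimiter scan cuts before the '~' ('a~==b' → 'a'); both are defensible on
-- such a malformed specifier, so those inputs are excluded rather than matched.
def Pre_clean_pkg_name_py (pkg_spec : String) : Prop :=
  PySem.Str.isIn "~==" (PySem.Str.strip pkg_spec) = false
instance (pkg_spec : String) : Decidable (Pre_clean_pkg_name_py pkg_spec) := by
  unfold Pre_clean_pkg_name_py; infer_instance

def pvWitness_clean_pkg_name_py : String := "requests>=2.0"

def Spec_clean_pkg_name_py (pkg_spec : String) (out : Option String) : Prop :=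
  out = clean_pkg_name_py_alt pkg_spec
instance (pkg_spec : String) (out : Option String) : Decidable (Spec_clean_pkg_name_py pkg_spec out) := by
  unfold Spec_clean_pkg_name_py; infer_instance

-- ===== CLAIM (what is proved, stated in full; the proofs are below) =====
def Claim_equal_clean_pkg_name_py : Prop :=
  ∀ (pkg_spec : String), Dom_clean_pkg_name_py pkg_spec → Pre_clean_pkg_name_py pkg_spec →
    Spec_clean_pkg_name_py pkg_spec (clean_pkg_name_py pkg_spec)

-- ===== LEMMAS AND PROOFS =====

-- the prefix of l strictly before the first occurrence of sep (l itself if none)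
def pvCutAt (sep : List Char) : List Char → List Char
  | [] => []
  | c :: rest => if sep.isPrefixOf (c :: rest) then [] else c :: pvCutAt sep rest

theorem pvCutAt_nil (sep : List Char) : pvCutAt sep [] = [] := rfl

theorem pvCutAt_single_cut (a : Char) (l : List Char) : pvCutAt [a] (a :: l) = [] := by
  simp [pvCutAt, List.isPrefixOf]

theorem pvCutAt_single_pass {a c : Char} (h : c ≠ a) (l : List Char) :
    pvCutAt [a] (c :: l) = c :: pvCutAt [a] l := by
  rw [pvCutAt]
  have : ([a].isPrefixOf (c :: l)) = false := by
    simp [List.isPrefixOf, Ne.symm h]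
  simp [this]

theorem pvCutAt_pair_cut (a b : Char) (l : List Char) : pvCutAt [a, b] (a :: b :: l) = [] := by
  simp [pvCutAt, List.isPrefixOf]

theorem pvCutAt_pair_pass {a b c : Char} {l : List Char}
    (h : ¬(c = a ∧ l.head? = some b)) : pvCutAt [a, b] (c :: l) = c :: pvCutAt [a, b] l := by
  rw [pvCutAt]
  have : ([a, b].isPrefixOf (c :: l)) = false := by
    cases l with
    | nil => simp [List.isPrefixOf]
    | cons d l' =>
      by_cases hca : c = a
      · have hdb : d ≠ b := by
          intro hdb
          exact h ⟨hca, by simp [hdb]⟩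
        simp [List.isPrefixOf, Ne.symm hdb]
      · simp [List.isPrefixOf, Ne.symm hca]
  simp [this]

theorem head?_pvCutAt {sep l : List Char} {x : Char}
    (h : (pvCutAt sep l).head? = some x) : l.head? = some x := by
  cases l with
  | nil => simp [pvCutAt] at h
  | cons c rest =>
    rw [pvCutAt] at h
    by_cases hp : sep.isPrefixOf (c :: rest)
    · simp [hp] at h
    · simp [hp] at h ⊢
      exact h

theorem pvCutAt_eq_self_of_not_infix {sep l : List Char} (h : ¬ sep <:+: l) :
    pvCutAt sep l = l := by
  induction l with
  | nil => rfl
  | cons c rest ih =>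
    rw [pvCutAt]
    have hp : (sep.isPrefixOf (c :: rest)) = false := by
      by_contra hb
      have hb' : sep.isPrefixOf (c :: rest) = true := by
        cases hx : sep.isPrefixOf (c :: rest)
        · exact absurd hx hb
        · rfl
      have : sep <+: c :: rest := List.isPrefixOf_iff_prefix.mp hb'
      exact h this.isInfix
    simp only [hp, Bool.false_eq_true, if_false]
    have : ¬ sep <:+: rest := by
      intro ⟨s, t, e⟩
      exact h ⟨c :: s, t, by simp [← e]⟩
    rw [ih this]

-- splitOn.go, with enough fuel, yields pvCutAt as its first piece
theorem pv_go_spec (sep : List Char) (hsep : sep ≠ []) :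
    ∀ (fuel : Nat) (l cur : List Char) (acc : List (List Char)), l.length < fuel →
      ∃ tail, PySem.Chars.splitOn.go sep fuel l cur acc
        = acc.reverse ++ (cur.reverse ++ pvCutAt sep l) :: tail := by
  intro fuel
  induction fuel with
  | zero => intro l cur acc h; omega
  | succ n ih =>
    intro l cur acc h
    cases l with
    | nil =>
      refine ⟨[], ?_⟩
      simp [PySem.Chars.splitOn.go, pvCutAt]
    | cons c rest =>
      rw [PySem.Chars.splitOn.go]
      by_cases hp : sep.isPrefixOf (c :: rest)
      · have hlen : (List.drop sep.length (c :: rest)).length < n := by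
          have h1 : 1 ≤ sep.length := by
            cases sep with
            | nil => exact absurd rfl hsep
            | cons _ _ => simp
          simp only [List.length_drop, List.length_cons] at *
          omega
        obtain ⟨tail, ht⟩ := ih (List.drop sep.length (c :: rest)) [] (cur.reverse :: acc) hlen
        refine ⟨pvCutAt sep (List.drop sep.length (c :: rest)) :: tail, ?_⟩
        rw [if_pos hp, ht, pvCutAt, if_pos hp]
        simp
      · have hlen : rest.length < n := by
          simp only [List.length_cons] at h
          omega
        obtain ⟨tail, ht⟩ := ih rest (c :: cur) acc hlen
        refine ⟨tail, ?_⟩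
        rw [if_neg hp, ht, pvCutAt, if_neg hp]
        simp

theorem pv_strHeadSplit (l sep : String) (h : sep.toList ≠ []) :
    ((PySem.Str.split? l sep).getD []).headD ""
      = String.ofList (pvCutAt sep.toList l.toList) := by
  obtain ⟨tail, ht⟩ := pv_go_spec sep.toList h (l.toList.length + 1) l.toList [] [] (by omega)
  have hne : (sep.toList.isEmpty) = false := by
    cases hs : sep.toList with
    | nil => exact absurd hs h
    | cons _ _ => simp
  have hlen : l.toList.length = l.length := by simp
  rw [hlen] at ht
  simp [PySem.Str.split?, PySem.Chars.split?, PySem.Chars.splitOn, hne, ht]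

theorem pv_strStep (l sep : String) (hs : sep.toList ≠ []) :
    (if PySem.Str.isIn sep l then ((PySem.Str.split? l sep).getD []).headD "" else l)
      = String.ofList (pvCutAt sep.toList l.toList) := by
  by_cases h : PySem.Str.isIn sep l
  · rw [if_pos h, pv_strHeadSplit l sep hs]
  · have hni : ¬ sep.toList <:+: l.toList := fun hin =>
      h ((PySem.Str.isIn_iff_infix (sub := sep) (s := l)).mpr hin)
    rw [if_neg h, pvCutAt_eq_self_of_not_infix hni]
    exact String.ofList_toList.symm

theorem pv_not_infix_tail {sep : List Char} {c : Char} {r : List Char}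
    (h : ¬ sep <:+: c :: r) : ¬ sep <:+: r := by
  intro ⟨s, t, e⟩
  exact h ⟨c :: s, t, by simp [← e]⟩

-- the A-side chain of cuts equals B's single scan, away from "~=="
theorem pv_chain_eq_bscan (t : List Char) (h : ¬ ['~', '=', '='] <:+: t) :
    pvCutAt ['['] (pvCutAt ['<'] (pvCutAt ['>'] (pvCutAt ['~', '=']
      (pvCutAt ['<', '='] (pvCutAt ['>', '='] (pvCutAt ['=', '=']
        (pvCutAt [';'] (pvCutAt ['#'] t)))))))) = bScanChars t := by
  induction t with
  | nil => rfl
  | cons c r ih =>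
    have hr : ¬ ['~', '=', '='] <:+: r := pv_not_infix_tail h
    have IH := ih hr
    by_cases hc1 : c = '#'
    · subst hc1
      rw [pvCutAt_single_cut]
      simp [pvCutAt_nil, bScanChars]
    by_cases hc2 : c = ';'
    · subst hc2
      rw [pvCutAt_single_pass (by decide), pvCutAt_single_cut]
      simp [pvCutAt_nil, bScanChars]
    by_cases hceq : c = '=' ∧ r.head? = some '='
    · obtain ⟨hc, hh⟩ := hceq
      subst hc
      obtain ⟨r', rfl⟩ : ∃ r', r = '=' :: r' := by
        cases r with
        | nil => simp at hh
        | cons d r' =>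
          simp only [List.head?_cons, Option.some.injEq] at hh
          exact ⟨r', by rw [hh]⟩
      rw [pvCutAt_single_pass (by decide), pvCutAt_single_pass (by decide),
          pvCutAt_single_pass (by decide), pvCutAt_single_pass (by decide),
          pvCutAt_pair_cut]
      simp [pvCutAt_nil, bScanChars]
    by_cases hctl : c = '~' ∧ r.head? = some '='
    · obtain ⟨hc, hh⟩ := hctl
      subst hc
      obtain ⟨r', rfl⟩ : ∃ r', r = '=' :: r' := by
        cases r with
        | nil => simp at hh
        | cons d r' =>
          simp only [List.head?_cons, Option.some.injEq] at hh
          exact ⟨r', by rw [hh]⟩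
      have hr' : r'.head? ≠ some '=' := by
        intro hh'
        obtain ⟨r'', rfl⟩ : ∃ r'', r' = '=' :: r'' := by
          cases r' with
          | nil => simp at hh'
          | cons d r'' =>
            simp only [List.head?_cons, Option.some.injEq] at hh'
            exact ⟨r'', by rw [hh']⟩
        exact h ⟨[], r'', rfl⟩
      rw [pvCutAt_single_pass (a := '#') (c := '~') (by decide),
          pvCutAt_single_pass (a := '#') (c := '=') (by decide),
          pvCutAt_single_pass (a := ';') (c := '~') (by decide),
          pvCutAt_single_pass (a := ';') (c := '=') (by decide)]
      rw [pvCutAt_pair_pass (a := '=') (b := '=') (c := '~') (by simp)]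
      rw [pvCutAt_pair_pass (a := '=') (b := '=') (c := '=') (by
        intro hx
        exact hr' (head?_pvCutAt (head?_pvCutAt hx.2)))]
      rw [pvCutAt_pair_pass (a := '>') (b := '=') (c := '~') (by simp),
          pvCutAt_pair_pass (a := '>') (b := '=') (c := '=') (by simp),
          pvCutAt_pair_pass (a := '<') (b := '=') (c := '~') (by simp),
          pvCutAt_pair_pass (a := '<') (b := '=') (c := '=') (by simp)]
      rw [pvCutAt_pair_cut]
      simp [pvCutAt_nil, bScanChars]
    by_cases hc3 : c = '<'
    · subst hc3
      rw [pvCutAt_single_pass (by decide), pvCutAt_single_pass (by decide)]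
      rw [pvCutAt_pair_pass (by simp), pvCutAt_pair_pass (by simp)]
      by_cases hb : (pvCutAt ['>', '='] (pvCutAt ['=', '=']
          (pvCutAt [';'] (pvCutAt ['#'] r)))).head? = some '='
      · obtain ⟨u, hu⟩ : ∃ u, pvCutAt ['>', '='] (pvCutAt ['=', '=']
            (pvCutAt [';'] (pvCutAt ['#'] r))) = '=' :: u := by
          generalize pvCutAt ['>', '='] (pvCutAt ['=', '=']
            (pvCutAt [';'] (pvCutAt ['#'] r))) = z at hb
          cases z with
          | nil => simp at hb
          | cons d u =>
            simp only [List.head?_cons, Option.some.injEq] at hb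
            exact ⟨u, by rw [hb]⟩
        rw [hu, pvCutAt_pair_cut]
        simp [pvCutAt_nil, bScanChars]
      · rw [pvCutAt_pair_pass (by
          intro hx
          exact hb hx.2)]
        rw [pvCutAt_pair_pass (by simp), pvCutAt_single_pass (by decide),
            pvCutAt_single_cut]
        simp [pvCutAt_nil, bScanChars]
    by_cases hc4 : c = '>'
    · subst hc4
      rw [pvCutAt_single_pass (by decide), pvCutAt_single_pass (by decide)]
      rw [pvCutAt_pair_pass (by simp)]
      by_cases hb : (pvCutAt ['=', '=']
          (pvCutAt [';'] (pvCutAt ['#'] r))).head? = some '='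
      · obtain ⟨u, hu⟩ : ∃ u, pvCutAt ['=', '=']
            (pvCutAt [';'] (pvCutAt ['#'] r)) = '=' :: u := by
          generalize pvCutAt ['=', '='] (pvCutAt [';'] (pvCutAt ['#'] r)) = z at hb
          cases z with
          | nil => simp at hb
          | cons d u =>
            simp only [List.head?_cons, Option.some.injEq] at hb
            exact ⟨u, by rw [hb]⟩
        rw [hu, pvCutAt_pair_cut]
        simp [pvCutAt_nil, bScanChars]
      · rw [pvCutAt_pair_pass (by
          intro hx
          exact hb hx.2)]
        rw [pvCutAt_pair_pass (by simp), pvCutAt_pair_pass (by simp),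
            pvCutAt_single_cut]
        simp [pvCutAt_nil, bScanChars]
    by_cases hc5 : c = '['
    · subst hc5
      rw [pvCutAt_single_pass (by decide), pvCutAt_single_pass (by decide)]
      rw [pvCutAt_pair_pass (by simp), pvCutAt_pair_pass (by simp),
          pvCutAt_pair_pass (by simp), pvCutAt_pair_pass (by simp)]
      rw [pvCutAt_single_pass (by decide), pvCutAt_single_pass (by decide),
          pvCutAt_single_cut]
      simp [bScanChars]
    -- default: every stage passes c
    · rw [pvCutAt_single_pass hc1, pvCutAt_single_pass hc2]
      rw [pvCutAt_pair_pass (by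
        intro hx
        exact hceq ⟨hx.1, head?_pvCutAt (head?_pvCutAt hx.2)⟩)]
      rw [pvCutAt_pair_pass (by
        intro hx
        exact hc4 hx.1)]
      rw [pvCutAt_pair_pass (by
        intro hx
        exact hc3 hx.1)]
      rw [pvCutAt_pair_pass (by
        intro hx
        exact hctl ⟨hx.1, head?_pvCutAt (head?_pvCutAt (head?_pvCutAt
          (head?_pvCutAt (head?_pvCutAt hx.2))))⟩)]
      rw [pvCutAt_single_pass hc4, pvCutAt_single_pass hc3, pvCutAt_single_pass hc5]
      rw [IH]
      have hb2 : ¬((c = '=' ∨ c = '~') ∧ r.head? = some '=') := by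
        intro ⟨hor, hh⟩
        cases hor with
        | inl h1 => exact hceq ⟨h1, hh⟩
        | inr h1 => exact hctl ⟨h1, hh⟩
      rw [bScanChars, if_neg (by
        intro hor
        rcases hor with h1 | h1 | h1 | h1 | h1
        exacts [hc1 h1, hc2 h1, hc3 h1, hc4 h1, hc5 h1]), if_neg hb2]

theorem pv_toList_ofList (xs : List Char) : (String.ofList xs).toList = xs := by simp

theorem pv_stepHead (l sep : String) (cs : List Char) (hcs : sep.toList = cs) (h : cs ≠ []) :
    ((PySem.Str.split? l sep).getD []).headD "" = String.ofList (pvCutAt cs l.toList) := by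
  have := pv_strHeadSplit l sep (by rw [hcs]; exact h)
  rwa [hcs] at this

theorem pv_stepIf (l sep : String) (cs : List Char) (hcs : sep.toList = cs) (h : cs ≠ []) :
    (if PySem.Str.isIn sep l then ((PySem.Str.split? l sep).getD []).headD "" else l)
      = String.ofList (pvCutAt cs l.toList) := by
  have := pv_strStep l sep (by rw [hcs]; exact h)
  rwa [hcs] at this

-- ===== VERDICT (by name: the statement is the Claim_ definition above) =====
set_option maxHeartbeats 1000000 in
theorem clean_pkg_name_py_spec : Claim_equal_clean_pkg_name_py := by
  intro pkg hdom hpre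
  unfold Spec_clean_pkg_name_py
  have hpre' : PySem.Str.isIn "~==" (PySem.Str.strip pkg) = false := hpre
  have hninf : ¬ ['~', '=', '='] <:+: (PySem.Str.strip pkg).toList := by
    intro hin
    have h1 : ("~==" : String).toList = ['~', '=', '='] := by decide
    have h2 : PySem.Str.isIn "~==" (PySem.Str.strip pkg) = true :=
      (PySem.Str.isIn_iff_infix _ _).mpr (h1 ▸ hin)
    rw [h2] at hpre'
    cases hpre'
  simp only [clean_pkg_name_py, clean_pkg_name_py_alt]
  by_cases hg : ((PySem.Str.strip pkg == "") || PySem.Str.startswith (PySem.Str.strip pkg) "#") = true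
  · rw [if_pos hg]
    have hnil : bScanChars (PySem.Str.strip pkg).toList = [] := by
      rcases Bool.or_eq_true_iff.mp hg with h1 | h1
      · have he : PySem.Str.strip pkg = "" := beq_iff_eq.mp h1
        rw [he]
        decide
      · have h2 : List.isPrefixOf ['#'] (PySem.Str.strip pkg).toList = true := h1
        obtain ⟨t2, ht2⟩ := List.isPrefixOf_iff_prefix.mp h2
        rw [← ht2]
        simp [bScanChars]
    rw [hnil]
    decide
  · rw [if_neg hg]
    rw [pv_stepHead _ "#" ['#'] (by decide) (by decide)]
    rw [pv_stepHead _ ";" [';'] (by decide) (by decide)]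
    rw [List.foldl_cons, List.foldl_cons, List.foldl_cons, List.foldl_cons, List.foldl_cons,
        List.foldl_cons, List.foldl_nil]
    rw [pv_stepIf _ "==" ['=', '='] (by decide) (by decide)]
    rw [pv_stepIf _ ">=" ['>', '='] (by decide) (by decide)]
    rw [pv_stepIf _ "<=" ['<', '='] (by decide) (by decide)]
    rw [pv_stepIf _ "~=" ['~', '='] (by decide) (by decide)]
    rw [pv_stepIf _ ">" ['>'] (by decide) (by decide)]
    rw [pv_stepIf _ "<" ['<'] (by decide) (by decide)]
    rw [pv_stepIf _ "[" ['['] (by decide) (by decide)]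
    simp only [pv_toList_ofList]
    rw [pv_chain_eq_bscan _ hninf]
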